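-- pv_equiv track=rewrite | github.com/TCS-2021/Data-Mining-Project | src/PrescriptiveAnalysis1/Backend/gspan.py | construct_dfs_code
-- ===== SOURCE A (Python) =====
-- def construct_dfs_code(graph, start_vertex, directed=True):
--     visited = set()
--     discovery_order = {}
--     dfs_tree_edges = []
--     back_edges = []
--     vertex_index = [0]
--
--     def dfs(vertex):
--         if vertex in visited:
--             return
--         discovery_order[vertex] = vertex_index[0]
--         visited.add(vertex)
--         vertex_index[0] += 1
--         for neighbor in graph.get(vertex, []):
--             if neighbor not in visited:
--                 dfs_tree_edges.append((vertex, neighbor))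
--                 dfs(neighbor)
--             elif (neighbor, vertex) not in dfs_tree_edges and vertex != neighbor:
--                 if discovery_order.get(neighbor, float('inf')) < discovery_order.get(vertex, float('inf')):
--                     if directed or neighbor < vertex:
--                         back_edges.append((vertex, neighbor))
--
--     dfs(start_vertex)
--     dfs_code = [(discovery_order[u], discovery_order[v], u, 1, v) for u, v in dfs_tree_edges]
--     dfs_code.extend([(discovery_order[u], discovery_order[v], u, 1, v) for u, v in back_edges])
--     return dfs_code, discovery_order
-- ===== SOURCE B (Python) =====
-- _SENTINEL = object()
--
-- def construct_dfs_code(graph, start_vertex, directed=True):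
--     # Iterative DFS with an explicit stack of (vertex, neighbor-iterator) frames
--     # replacing A's recursive helper; same traversal order, hence the same output.
--     visited = set()
--     discovery_order = {}
--     dfs_tree_edges = []
--     back_edges = []
--     counter = 0
--
--     discovery_order[start_vertex] = counter
--     visited.add(start_vertex)
--     counter += 1
--     stack = [(start_vertex, iter(graph.get(start_vertex, [])))]
--     while stack:
--         vertex, it = stack[-1]
--         neighbor = next(it, _SENTINEL)
--         if neighbor is _SENTINEL:
--             stack.pop()
--         elif neighbor not in visited:
--             dfs_tree_edges.append((vertex, neighbor))
--             discovery_order[neighbor] = counter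
--             visited.add(neighbor)
--             counter += 1
--             stack.append((neighbor, iter(graph.get(neighbor, []))))
--         elif (neighbor, vertex) not in dfs_tree_edges and vertex != neighbor:
--             if discovery_order.get(neighbor, float('inf')) < discovery_order.get(vertex, float('inf')):
--                 if directed or neighbor < vertex:
--                     back_edges.append((vertex, neighbor))
--
--     dfs_code = [(discovery_order[u], discovery_order[v], u, 1, v) for u, v in dfs_tree_edges]
--     dfs_code.extend([(discovery_order[u], discovery_order[v], u, 1, v) for u, v in back_edges])
--     return dfs_code, discovery_order
-- ===== Notes on version B (the rewrite author's own statement) =====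
-- stated objective: alternative
-- what changed: The recursive dfs helper is replaced by an iterative DFS using an explicit stack of (vertex, neighbor-iterator) frames consumed lazily, preserving the exact interleaving of tree-edge and back-edge events.
import Mathlib
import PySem

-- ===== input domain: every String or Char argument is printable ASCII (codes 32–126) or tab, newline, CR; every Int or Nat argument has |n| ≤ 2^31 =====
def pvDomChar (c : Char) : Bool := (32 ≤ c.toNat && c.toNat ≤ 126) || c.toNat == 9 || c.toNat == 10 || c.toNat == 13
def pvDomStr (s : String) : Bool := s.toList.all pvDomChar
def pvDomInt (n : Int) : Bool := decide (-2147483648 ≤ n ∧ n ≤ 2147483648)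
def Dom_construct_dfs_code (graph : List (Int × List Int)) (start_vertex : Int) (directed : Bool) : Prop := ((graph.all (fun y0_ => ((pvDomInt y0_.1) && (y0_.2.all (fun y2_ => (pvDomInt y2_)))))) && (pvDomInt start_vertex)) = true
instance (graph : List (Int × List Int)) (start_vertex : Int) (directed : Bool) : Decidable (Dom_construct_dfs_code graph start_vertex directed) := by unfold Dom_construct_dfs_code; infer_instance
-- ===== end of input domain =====

-- B replaces A's recursive DFS helper by an explicit stack of (vertex, remaining-neighbors) frames
-- consumed lazily, preserving the exact interleaving of tree- and back-edge events (objective: alternative).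

-- ===== PORT A =====
-- Shared state record: (visited, discovery_order, dfs_tree_edges, back_edges, vertex_index[0]).
structure DfsSt where
  visited : PySem.Set Int
  disc : PySem.Dict Int Int
  tree : List (Int × Int)
  back : List (Int × Int)
  idx : Int
deriving Repr, DecidableEq

-- graph.get(vertex, [])
def pvNbrs (graph : List (Int × List Int)) (v : Int) : List Int :=
  PySem.Dict.getD ⟨graph⟩ v []

-- every vertex the traversal can ever see (termination bookkeeping only)
def pvAllV (graph : List (Int × List Int)) (start : Int) : List Int :=
  start :: (graph.map Prod.fst ++ (graph.map Prod.snd).flatten)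

-- number of not-yet-visited candidate vertices (termination measure)
def pvCnt (graph : List (Int × List Int)) (start : Int) (vis : List Int) : Nat :=
  ((pvAllV graph start).filter (fun x => decide (x ∉ vis))).length

-- exact model of `d.get(k, float('inf')) < d.get(k', float('inf'))` on int values:
-- none plays float('inf'); int < inf is True, inf < anything is False.
def pvInfLt : Option Int → Option Int → Bool
  | some a, some b => decide (a < b)
  | some _, none => true
  | _, _ => false

-- the elif-branch body (identical lines in both Pythons)
def pvBackStep (directed : Bool) (v n : Int) (s : DfsSt) : DfsSt :=
  if ((n, v) ∉ s.tree) ∧ v ≠ n then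
    if pvInfLt (s.disc.get? n) (s.disc.get? v) then
      if directed || decide (n < v) then { s with back := s.back ++ [(v, n)] } else s
    else s
  else s

lemma pvBackStep_visited (directed : Bool) (v n : Int) (s : DfsSt) :
    (pvBackStep directed v n s).visited = s.visited := by
  unfold pvBackStep; split_ifs <;> rfl

lemma pvFilter_length_le {α : Type} (p q : α → Bool) (h : ∀ a, q a = true → p a = true)
    (l : List α) : (l.filter q).length ≤ (l.filter p).length := by
  induction l with
  | nil => simp
  | cons a l ih =>
    rw [List.filter_cons, List.filter_cons]
    by_cases hq : q a = true
    · rw [if_pos hq, if_pos (h a hq)]; simpa using ih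
    · rw [if_neg hq]
      split_ifs with hp
      · exact ih.trans (Nat.le_succ _)
      · exact ih

lemma pvFilter_length_lt {α : Type} (p q : α → Bool) (h : ∀ a, q a = true → p a = true)
    (l : List α) {a : α} (ha : a ∈ l) (hpa : p a = true) (hqa : q a = false) :
    (l.filter q).length < (l.filter p).length := by
  induction l with
  | nil => simp at ha
  | cons b l ih =>
    rw [List.filter_cons, List.filter_cons]
    rcases List.mem_cons.mp ha with rfl | ha'
    · rw [if_pos hpa, if_neg (by simp [hqa])]
      exact Nat.lt_succ_of_le (pvFilter_length_le p q h l)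
    · by_cases hq : q b = true
      · rw [if_pos hq, if_pos (h b hq)]; simpa using ih ha'
      · rw [if_neg hq]
        split_ifs with hp
        · exact (ih ha').trans_le (Nat.le_succ _)
        · exact ih ha'

lemma pvCnt_le_of_subset (graph : List (Int × List Int)) (start : Int)
    {vis vis' : List Int} (h : ∀ x ∈ vis, x ∈ vis') :
    pvCnt graph start vis' ≤ pvCnt graph start vis := by
  apply pvFilter_length_le
  intro a ha
  simp only [decide_eq_true_eq] at *
  exact fun hm => ha (h a hm)

lemma pvCnt_add_lt (graph : List (Int × List Int)) (start : Int)
    {v : Int} {vis : PySem.Set Int} (hv : v ∈ pvAllV graph start) (hvis : v ∉ vis) :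
    pvCnt graph start (PySem.Set.add vis v) < pvCnt graph start vis := by
  unfold pvCnt
  rw [PySem.Set.add_of_not_mem hvis]
  exact pvFilter_length_lt _ _
    (by intro a ha; simp only [decide_eq_true_eq, List.mem_append] at *; exact fun hm => ha (Or.inl hm))
    _ hv (by simpa using hvis) (by simp)

lemma pvMem_nbrs (graph : List (Int × List Int)) (start : Int) {m v : Int}
    (hm : m ∈ pvNbrs graph v) : m ∈ pvAllV graph start := by
  unfold pvNbrs PySem.Dict.getD PySem.Dict.get? at hm
  cases hfind : List.find? (fun p => p.1 == v) (PySem.Dict.items ⟨graph⟩) with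
  | none => rw [hfind] at hm; simp at hm
  | some p =>
    rw [hfind] at hm
    simp only [Option.map_some, Option.getD_some] at hm
    have hp : p ∈ graph := List.mem_of_find?_eq_some hfind
    unfold pvAllV
    refine List.mem_cons_of_mem _ (List.mem_append_right _ ?_)
    exact List.mem_flatten.mpr ⟨p.2, List.mem_map_of_mem hp, hm⟩

mutual
-- def dfs(vertex): …  (the inner recursive helper of A; the subtype records that
-- visited only grows, which the termination measure needs)
def pvDfsA (graph : List (Int × List Int)) (start : Int) (directed : Bool)
    (v : Int) (hv : v ∈ pvAllV graph start) (s : DfsSt) :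
    {t : DfsSt // ∀ x ∈ s.visited, x ∈ t.visited} :=
  if hvis : v ∈ s.visited then ⟨s, fun _ hx => hx⟩
  else
    let t := pvLoopA graph start directed v (pvNbrs graph v)
      (fun _ hn => pvMem_nbrs graph start hn)
      { s with disc := s.disc.insert v s.idx,
               visited := PySem.Set.add s.visited v,
               idx := s.idx + 1 }
    ⟨t.1, fun x hx => t.2 x ((PySem.Set.mem_add _ _ _).mpr (Or.inl hx))⟩
termination_by (pvCnt graph start s.visited, 0)
decreasing_by
  exact Prod.Lex.left _ _ (pvCnt_add_lt graph start hv hvis)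

-- for neighbor in graph.get(vertex, []): …  (the body's for-loop)
def pvLoopA (graph : List (Int × List Int)) (start : Int) (directed : Bool)
    (v : Int) (ns : List Int) (hns : ∀ n ∈ ns, n ∈ pvAllV graph start) (s : DfsSt) :
    {t : DfsSt // ∀ x ∈ s.visited, x ∈ t.visited} :=
  match ns with
  | [] => ⟨s, fun _ hx => hx⟩
  | n :: rest =>
    if hn : n ∈ s.visited then
      let r := pvLoopA graph start directed v rest
        (fun m hm => hns m (List.mem_cons_of_mem _ hm)) (pvBackStep directed v n s)
      ⟨r.1, fun x hx => r.2 x (by rw [pvBackStep_visited]; exact hx)⟩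
    else
      let t := pvDfsA graph start directed n (hns n List.mem_cons_self)
        { s with tree := s.tree ++ [(v, n)] }
      let r := pvLoopA graph start directed v rest
        (fun m hm => hns m (List.mem_cons_of_mem _ hm)) t.1
      ⟨r.1, fun x hx => r.2 x (t.2 x hx)⟩
termination_by (pvCnt graph start s.visited, ns.length)
decreasing_by
  · rw [pvBackStep_visited]; exact Prod.Lex.right _ (by simp only [List.length_cons]; omega)
  · exact Prod.Lex.right _ (by simp only [List.length_cons]; omega)
  · have h1 : pvCnt graph start t.1.visited ≤ pvCnt graph start s.visited :=
      pvCnt_le_of_subset graph start t.2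
    rcases lt_or_eq_of_le h1 with h | h
    · exact Prod.Lex.left _ _ h
    · rw [h]; exact Prod.Lex.right _ (by simp only [List.length_cons]; omega)
end

-- the two final list comprehensions + returned dict (identical lines in both Pythons);
-- discovery_order[u] is total here (u, v are always visited), ported with default 0
def pvEmit (s : DfsSt) : (List (Int × Int × Int × Int × Int)) × (List (Int × Int)) :=
  ((s.tree.map fun p => (s.disc.getD p.1 0, s.disc.getD p.2 0, p.1, 1, p.2)) ++
   (s.back.map fun p => (s.disc.getD p.1 0, s.disc.getD p.2 0, p.1, 1, p.2)),
   s.disc.items)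

def construct_dfs_code (graph : List (Int × List Int)) (start_vertex : Int) (directed : Bool) :
    (List (Int × Int × Int × Int × Int)) × (List (Int × Int)) :=
  pvEmit (pvDfsA graph start_vertex directed start_vertex
    (List.mem_cons_self) ⟨PySem.Set.empty, PySem.Dict.empty, [], [], 0⟩).1

-- ===== PORT B =====
-- the while-stack loop of Source B: frames are (vertex, not-yet-consumed neighbors)
def pvRunB (graph : List (Int × List Int)) (start : Int) (directed : Bool)
    (stack : List (Int × List Int))
    (hstk : ∀ p ∈ stack, ∀ n ∈ p.2, n ∈ pvAllV graph start) (s : DfsSt) : DfsSt :=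
  match stack with
  | [] => s
  | (_, []) :: rest =>
    pvRunB graph start directed rest (fun p hp => hstk p (List.mem_cons_of_mem _ hp)) s
  | (v, n :: ns) :: rest =>
    if hn : n ∈ s.visited then
      pvRunB graph start directed ((v, ns) :: rest)
        (by
          intro p hp m hm
          rcases List.mem_cons.mp hp with rfl | hp'
          · exact hstk (v, n :: ns) List.mem_cons_self m (List.mem_cons_of_mem _ hm)
          · exact hstk p (List.mem_cons_of_mem _ hp') m hm)
        (pvBackStep directed v n s)
    else
      pvRunB graph start directed ((n, pvNbrs graph n) :: (v, ns) :: rest)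
        (by
          intro p hp m hm
          rcases List.mem_cons.mp hp with rfl | hp'
          · exact pvMem_nbrs graph start hm
          · rcases List.mem_cons.mp hp' with rfl | hp''
            · exact hstk (v, n :: ns) List.mem_cons_self m (List.mem_cons_of_mem _ hm)
            · exact hstk p (List.mem_cons_of_mem _ hp'') m hm)
        { s with tree := s.tree ++ [(v, n)],
                 disc := s.disc.insert n s.idx,
                 visited := PySem.Set.add s.visited n,
                 idx := s.idx + 1 }
termination_by (pvCnt graph start s.visited, (stack.map (fun p => p.2.length + 1)).sum)
decreasing_by
  · exact Prod.Lex.right _ (by simp only [List.map_cons, List.sum_cons]; omega)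
  · rw [pvBackStep_visited]; exact Prod.Lex.right _ (by simp only [List.map_cons, List.sum_cons, List.length_cons]; omega)
  · exact Prod.Lex.left _ _
      (pvCnt_add_lt graph start (hstk (v, n :: ns) List.mem_cons_self n List.mem_cons_self) hn)

def construct_dfs_code_alt (graph : List (Int × List Int)) (start_vertex : Int) (directed : Bool) :
    (List (Int × Int × Int × Int × Int)) × (List (Int × Int)) :=
  -- discovery_order[start]=0; visited={start}; counter=1; stack=[(start, iter(nbrs))]
  pvEmit (pvRunB graph start_vertex directed [(start_vertex, pvNbrs graph start_vertex)]
    (fun p hp m hm => by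
      rcases List.mem_cons.mp hp with rfl | h
      · exact pvMem_nbrs graph start_vertex hm
      · simp at h)
    ⟨PySem.Set.add PySem.Set.empty start_vertex,
     PySem.Dict.insert PySem.Dict.empty start_vertex 0, [], [], 1⟩)

-- ===== PRECONDITION & SPEC =====
def Spec_construct_dfs_code (graph : List (Int × List Int)) (start_vertex : Int) (directed : Bool) (out : (List (Int × Int × Int × Int × Int)) × (List (Int × Int))) : Prop := out = construct_dfs_code_alt graph start_vertex directed
instance (graph : List (Int × List Int)) (start_vertex : Int) (directed : Bool) (out : (List (Int × Int × Int × Int × Int)) × (List (Int × Int))) : Decidable (Spec_construct_dfs_code graph start_vertex directed out) := by unfold Spec_construct_dfs_code; infer_instance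

-- ===== CLAIM (what is proved, stated in full; the proofs are below) =====
def Claim_equal_construct_dfs_code : Prop := ∀ (graph : List (Int × List Int)) (start_vertex : Int) (directed : Bool), Dom_construct_dfs_code graph start_vertex directed → Spec_construct_dfs_code graph start_vertex directed (construct_dfs_code graph start_vertex directed)

-- ===== LEMMAS AND PROOFS =====
-- unfolding lemma for A's recursive dfs on an unvisited vertex
lemma pvDfsA_not_mem (graph : List (Int × List Int)) (start : Int) (directed : Bool)
    (v : Int) (hv : v ∈ pvAllV graph start) (s : DfsSt) (hvis : v ∉ s.visited) :
    (pvDfsA graph start directed v hv s).1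
      = (pvLoopA graph start directed v (pvNbrs graph v)
          (fun _ hn => pvMem_nbrs graph start hn)
          { s with disc := s.disc.insert v s.idx,
                   visited := PySem.Set.add s.visited v,
                   idx := s.idx + 1 }).1 := by
  rw [pvDfsA, dif_neg hvis]

theorem pvBridge (graph : List (Int × List Int)) (start : Int) (directed : Bool)
    (v : Int) (ns : List Int) (hns : ∀ n ∈ ns, n ∈ pvAllV graph start)
    (rest : List (Int × List Int)) (hrest : ∀ p ∈ rest, ∀ n ∈ p.2, n ∈ pvAllV graph start)
    (hall : ∀ p ∈ (v, ns) :: rest, ∀ n ∈ p.2, n ∈ pvAllV graph start) (s : DfsSt) :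
    pvRunB graph start directed ((v, ns) :: rest) hall s
      = pvRunB graph start directed rest hrest (pvLoopA graph start directed v ns hns s).1 := by
  cases ns with
  | nil =>
    conv_lhs => rw [pvRunB]
    rw [pvLoopA]
  | cons n ns' =>
    conv_lhs => rw [pvRunB]
    rw [pvLoopA]
    by_cases hn : n ∈ s.visited
    · rw [dif_pos hn, dif_pos hn]
      exact pvBridge graph start directed v ns'
        (fun m hm => hns m (List.mem_cons_of_mem _ hm)) rest hrest
        (by
          intro p hp m hm
          rcases List.mem_cons.mp hp with rfl | hp'
          · exact hns m (List.mem_cons_of_mem _ hm)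
          · exact hrest p hp' m hm)
        (pvBackStep directed v n s)
    · rw [dif_neg hn, dif_neg hn]
      have hns' : ∀ m ∈ ns', m ∈ pvAllV graph start :=
        fun m hm => hns m (List.mem_cons_of_mem _ hm)
      have hnn : n ∈ pvAllV graph start := hns n List.mem_cons_self
      have hnbrs : ∀ m ∈ pvNbrs graph n, m ∈ pvAllV graph start :=
        fun _ hm => pvMem_nbrs graph start hm
      have hcons : ∀ p ∈ (v, ns') :: rest, ∀ m ∈ p.2, m ∈ pvAllV graph start := by
        intro p hp m hm
        rcases List.mem_cons.mp hp with rfl | hp'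
        · exact hns' m hm
        · exact hrest p hp' m hm
      have hpush : ∀ p ∈ (n, pvNbrs graph n) :: (v, ns') :: rest, ∀ m ∈ p.2, m ∈ pvAllV graph start := by
        intro p hp m hm
        rcases List.mem_cons.mp hp with rfl | hp'
        · exact hnbrs m hm
        · exact hcons p hp' m hm
      show pvRunB graph start directed ((n, pvNbrs graph n) :: (v, ns') :: rest) hpush
          { s with tree := s.tree ++ [(v, n)], disc := s.disc.insert n s.idx,
                   visited := PySem.Set.add s.visited n, idx := s.idx + 1 }
        = pvRunB graph start directed rest hrest
            (pvLoopA graph start directed v ns' hns'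
              (pvDfsA graph start directed n hnn { s with tree := s.tree ++ [(v, n)] }).1).1
      rw [pvDfsA_not_mem graph start directed n hnn { s with tree := s.tree ++ [(v, n)] } hn]
      exact (pvBridge graph start directed n (pvNbrs graph n) hnbrs ((v, ns') :: rest) hcons hpush
          { s with tree := s.tree ++ [(v, n)], disc := s.disc.insert n s.idx,
                   visited := PySem.Set.add s.visited n, idx := s.idx + 1 }).trans
        (pvBridge graph start directed v ns' hns' rest hrest hcons
          (pvLoopA graph start directed n (pvNbrs graph n)
            (fun _ hm => pvMem_nbrs graph start hm)
            { s with tree := s.tree ++ [(v, n)], disc := s.disc.insert n s.idx,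
                     visited := PySem.Set.add s.visited n, idx := s.idx + 1 }).1)
termination_by (pvCnt graph start s.visited, ns.length)
decreasing_by
  · rw [pvBackStep_visited]
    subst_eqs
    exact Prod.Lex.right _ (by simp only [List.length_cons]; omega)
  · exact Prod.Lex.left _ _ (pvCnt_add_lt graph start hnn hn)
  · refine Prod.Lex.left _ _
      (lt_of_le_of_lt (pvCnt_le_of_subset graph start ?_) (pvCnt_add_lt graph start hnn hn))
    exact fun x hx => (pvLoopA graph start directed n (pvNbrs graph n) hnbrs
      { s with tree := s.tree ++ [(v, n)], disc := s.disc.insert n s.idx,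
               visited := PySem.Set.add s.visited n, idx := s.idx + 1 }).2 x hx

-- ===== VERDICT (by name: the statement is the Claim_ definition above) =====
theorem construct_dfs_code_spec : Claim_equal_construct_dfs_code := by
  intro graph sv d _
  unfold Spec_construct_dfs_code construct_dfs_code construct_dfs_code_alt
  congr 1
  rw [pvDfsA_not_mem graph sv d sv List.mem_cons_self
    ⟨PySem.Set.empty, PySem.Dict.empty, [], [], 0⟩ (by simp [PySem.Set.empty])]
  rw [pvBridge graph sv d sv (pvNbrs graph sv) (fun _ hm => pvMem_nbrs graph sv hm)
    [] (by simp)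
    (fun p hp m hm => by
      rcases List.mem_cons.mp hp with rfl | h
      · exact pvMem_nbrs graph sv hm
      · simp at h)]
  rw [pvRunB]
  rfl
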